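-- pv_equiv track=rewrite | github.com/AndrewGuo1228/Portfolio-Optimization | regime/regime_calibration.py | _smooth_regime_labels_asymmetric
-- ===== SOURCE A (Python) =====
-- def _smooth_regime_labels_asymmetric(
--     labels: list,
--     window: int,
--     downtrend_window: int = 2,
-- ) -> list:
--     """Asymmetric backward-looking smoother.
--
--     DOWNTREND is treated with higher sensitivity: if any label in the short
--     ``downtrend_window`` lookback starts with "DOWNTREND", the output flips
--     immediately to that label.  All other regimes use the standard
--     ``window``-day rolling mode.
--     """
--     from collections import Counter
--     result: list = []
--     for i in range(len(labels)):
--         down_w = min(downtrend_window, i + 1)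
--         recent_short = labels[max(0, i - down_w + 1): i + 1]
--         downtrend_labels = [l for l in recent_short if str(l).startswith("DOWNTREND")]
--         if downtrend_labels:
--             result.append(Counter(downtrend_labels).most_common(1)[0][0])
--         else:
--             normal_w = min(window, i + 1)
--             recent = labels[max(0, i - normal_w + 1): i + 1]
--             result.append(Counter(recent).most_common(1)[0][0])
--     return result
-- ===== SOURCE B (Python) =====
-- from collections import deque
--
--
-- def _smooth_regime_labels_asymmetric(
--     labels: list,
--     window: int,
--     downtrend_window: int = 2,
-- ) -> list:
--     """Single pass with sliding-window position tables.
--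
--     ``pos`` maps each label to the deque of its indices inside the current
--     ``window``-day lookback; ``dpos`` does the same for DOWNTREND-prefixed
--     labels inside the short ``downtrend_window`` lookback.  Both are updated
--     incrementally (append the new index, evict the index that slides out), so
--     no window is ever re-sliced or re-counted.  The rolling mode with
--     Counter's tie-break (most frequent, earliest first occurrence wins) is
--     the table entry minimising (-count, first position in window).
--     """
--     pos = {}
--     dpos = {}
--     out = []
--     for i, lab in enumerate(labels):
--         # long window: admit i, evict i - window
--         pos.setdefault(lab, deque()).append(i)
--         if i >= window:
--             old = labels[i - window]
--             ps = pos[old]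
--             ps.popleft()
--             if not ps:
--                 del pos[old]
--         # short window: only DOWNTREND-prefixed labels are tracked
--         if downtrend_window > 0:
--             if lab.startswith("DOWNTREND"):
--                 dpos.setdefault(lab, deque()).append(i)
--             if i >= downtrend_window:
--                 old = labels[i - downtrend_window]
--                 if old.startswith("DOWNTREND"):
--                     ds = dpos[old]
--                     ds.popleft()
--                     if not ds:
--                         del dpos[old]
--         table = dpos if dpos else pos
--         best = min(table.items(), key=lambda kv: (-len(kv[1]), kv[1][0]))
--         out.append(best[0])
--     return out
-- ===== Notes on version B (the rewrite author's own statement) =====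
-- stated objective: alternative
-- what changed: B replaces A's per-index window re-slicing and Counter rebuild by one pass that maintains sliding-window position tables (label -> deque of indices) for both lookbacks with incremental append/evict updates, reading the rolling mode off the table as the entry minimising (-count, first position).
-- outside the precondition, e.g. on _smooth_regime_labels_asymmetric(['DOWNTREND'], -1, 1): A returns ['DOWNTREND'], B raises IndexError
import Mathlib
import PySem

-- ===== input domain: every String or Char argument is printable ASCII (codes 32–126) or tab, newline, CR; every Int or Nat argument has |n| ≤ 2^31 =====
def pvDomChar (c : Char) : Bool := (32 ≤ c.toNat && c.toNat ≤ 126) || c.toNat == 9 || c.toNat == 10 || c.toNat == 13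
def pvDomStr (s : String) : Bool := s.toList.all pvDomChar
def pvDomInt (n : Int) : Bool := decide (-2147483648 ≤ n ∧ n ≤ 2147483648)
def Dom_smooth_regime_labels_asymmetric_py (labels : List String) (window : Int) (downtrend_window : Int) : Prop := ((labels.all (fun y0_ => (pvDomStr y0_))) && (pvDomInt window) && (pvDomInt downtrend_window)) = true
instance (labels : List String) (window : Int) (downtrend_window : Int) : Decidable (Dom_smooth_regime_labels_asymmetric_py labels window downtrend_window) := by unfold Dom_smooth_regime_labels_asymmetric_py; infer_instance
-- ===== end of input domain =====

-- B is one pass maintaining sliding-window position tables with incremental append/evict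
-- updates instead of re-slicing and re-counting a window per index (objective: alternative).

-- ===== PORT A =====
-- Counter(xs).most_common(1)[0][0]: most_common(n) = sorted(items, key=count, reverse=True)[:n]
-- (stable, so ties keep Counter insertion order = first-occurrence order); [0] on an empty
-- Counter raises IndexError — excluded by Pre_, "" is never produced inside Pre_.
def pvMostCommon1A (xs : List String) : String :=
  match PySem.List.sorted (PySem.Dict.counter xs).items (fun p => p.2) true with
  | [] => ""
  | p :: _ => p.1

def smooth_regime_labels_asymmetric_py (labels : List String) (window : Int) (downtrend_window : Int) : List String :=
  (PySem.List.pyRange 0 (labels.length : Int) 1).foldl (fun result i =>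
    let down_w := min downtrend_window (i + 1)
    let recent_short := PySem.List.slice labels (some (max 0 (i - down_w + 1))) (some (i + 1))
    let downtrend_labels := recent_short.filter (fun l => PySem.Str.startswith l "DOWNTREND")
    if downtrend_labels ≠ [] then
      result ++ [pvMostCommon1A downtrend_labels]
    else
      let normal_w := min window (i + 1)
      let recent := PySem.List.slice labels (some (max 0 (i - normal_w + 1))) (some (i + 1))
      result ++ [pvMostCommon1A recent]) []

-- ===== PORT B =====
-- key comparison (-len(kv[1]), kv[1][0]) < (-len(kv'[1]), kv'[1][0]) of Source B's min, spelled
-- out lexicographically; kv[1][0] is headD 0 (table entries are nonempty deques in Python).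
def pvKeyLt (p q : String × List Int) : Bool :=
  decide (q.2.length < p.2.length ∨ (p.2.length = q.2.length ∧ p.2.headD 0 < q.2.headD 0))

-- min(table.items(), key=...): Python's min keeps the first strict minimum; min of an empty
-- table raises ValueError — unreachable inside Pre_, "" stands for that case.
def pvBestLabel (items : List (String × List Int)) : String :=
  match items with
  | [] => ""
  | x :: xs => (xs.foldl (fun b p => if pvKeyLt p b then p else b) x).1

-- one iteration of Source B's loop; deques are Lists (popleft = drop 1), labels[i - window] /
-- labels[i - downtrend_window] are in range inside Pre_ (pyGetD is exact there).
def pvStepB (labels : List String) (window : Int) (downtrend_window : Int)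
    (st : PySem.Dict String (List Int) × PySem.Dict String (List Int) × List String)
    (p : Int × String) :
    PySem.Dict String (List Int) × PySem.Dict String (List Int) × List String :=
  let i := p.1
  let lab := p.2
  let pos := st.1.insert lab (st.1.getD lab [] ++ [i])
  let pos :=
    if window ≤ i then
      let old := PySem.List.pyGetD labels (i - window) ""
      let ps := (pos.getD old []).drop 1
      if ps = [] then pos.erase old else pos.insert old ps
    else pos
  let dpos :=
    if 0 < downtrend_window then
      let dpos := if PySem.Str.startswith lab "DOWNTREND" then st.2.1.insert lab (st.2.1.getD lab [] ++ [i]) else st.2.1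
      if downtrend_window ≤ i then
        let old := PySem.List.pyGetD labels (i - downtrend_window) ""
        if PySem.Str.startswith old "DOWNTREND" then
          let ds := (dpos.getD old []).drop 1
          if ds = [] then dpos.erase old else dpos.insert old ds
        else dpos
      else dpos
    else st.2.1
  let table := if dpos.items ≠ [] then dpos else pos
  (pos, dpos, st.2.2 ++ [pvBestLabel table.items])

def smooth_regime_labels_asymmetric_py_alt (labels : List String) (window : Int) (downtrend_window : Int) : List String :=
  ((PySem.List.enumerate labels 0).foldl (pvStepB labels window downtrend_window)
      (PySem.Dict.empty, PySem.Dict.empty, [])).2.2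

-- ===== PRECONDITION & SPEC =====
-- Pre_ excludes the inputs where A raises IndexError (non-positive window at some index whose
-- short lookback has no DOWNTREND-prefixed label), and additionally negative window when every
-- short lookback does have one: there A returns but B's sliding-window eviction indexes
-- labels[i - window] past the end and raises IndexError.
def Pre_smooth_regime_labels_asymmetric_py (labels : List String) (window : Int) (downtrend_window : Int) : Prop :=
  0 ≤ window ∧ (1 ≤ window ∨ ∀ i ∈ List.range labels.length,
    ∃ l ∈ PySem.List.slice labels (some (max 0 ((i : Int) - min downtrend_window ((i : Int) + 1) + 1))) (some ((i : Int) + 1)),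
      PySem.Str.startswith l "DOWNTREND" = true)
instance (labels : List String) (window : Int) (downtrend_window : Int) : Decidable (Pre_smooth_regime_labels_asymmetric_py labels window downtrend_window) := by unfold Pre_smooth_regime_labels_asymmetric_py; infer_instance

def pvWitness_smooth_regime_labels_asymmetric_py : List String × Int × Int := (["DOWNTREND_BEAR", "UPTREND", "UPTREND"], 3, 2)

def Spec_smooth_regime_labels_asymmetric_py (labels : List String) (window : Int) (downtrend_window : Int) (out : List String) : Prop := out = smooth_regime_labels_asymmetric_py_alt labels window downtrend_window
instance (labels : List String) (window : Int) (downtrend_window : Int) (out : List String) : Decidable (Spec_smooth_regime_labels_asymmetric_py labels window downtrend_window out) := by unfold Spec_smooth_regime_labels_asymmetric_py; infer_instance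

-- ===== CLAIM (what is proved, stated in full; the proofs are below) =====
def Claim_equal_smooth_regime_labels_asymmetric_py : Prop := ∀ (labels : List String) (window : Int) (downtrend_window : Int), Dom_smooth_regime_labels_asymmetric_py labels window downtrend_window → Pre_smooth_regime_labels_asymmetric_py labels window downtrend_window → Spec_smooth_regime_labels_asymmetric_py labels window downtrend_window (smooth_regime_labels_asymmetric_py labels window downtrend_window)


-- ===== LEMMAS AND PROOFS =====

-- labels[j] as a total read (all reads are in range where it is used)
def pvF (labels : List String) (j : Int) : String := PySem.List.pyGetD labels j ""

-- indices of the current window carrying label k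
def pvLfun (labels : List String) (idxs : List Int) (k : String) : List Int :=
  idxs.filter (fun j => pvF labels j == k)

def pvOpt (l : List Int) : Option (List Int) := if l = [] then none else some l

-- the long window of indices feeding the output at step i-1 / entering step i
def pvWin (w i : Int) : List Int := PySem.List.pyRange (max 0 (i - w)) i 1

-- the short window restricted to DOWNTREND-prefixed labels
def pvWinD (labels : List String) (dw i : Int) : List Int :=
  (pvWin dw i).filter (fun j => PySem.Str.startswith (pvF labels j) "DOWNTREND")

-- loop invariant: both tables are exactly the per-label index lists of their windows
def pvInv (labels : List String) (window dw i : Int)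
    (pos dpos : PySem.Dict String (List Int)) : Prop :=
  pos.keys.Nodup ∧ dpos.keys.Nodup ∧
  (∀ k, pos.get? k = pvOpt (pvLfun labels (pvWin window i) k)) ∧
  (∀ k, dpos.get? k = pvOpt (pvLfun labels (pvWinD labels dw i) k))

-- ---- Dict.erase facts (transparent definition; not provided by the prelude) ----
theorem pv_find?_filter_ne {ν : Type} (items : List (String × ν)) (k k' : String) (hne : k' ≠ k) :
    (items.filter (fun p => !(p.1 == k))).find? (fun p => p.1 == k') = items.find? (fun p => p.1 == k') := by
  induction items with
  | nil => rfl
  | cons x xs ih =>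
    by_cases hx : x.1 = k
    · have h1 : (x.1 == k) = true := by simp [hx]
      have h2 : (x.1 == k') = false := by simp [hx, Ne.symm hne]
      simp [List.filter_cons, h1, List.find?_cons, h2, ih]
    · have h1 : (x.1 == k) = false := by simp [hx]
      by_cases hx' : x.1 = k'
      · simp [List.filter_cons, h1, List.find?_cons, hx', hne]
      · have h2 : (x.1 == k') = false := by simp [hx']
        simp [List.filter_cons, h1, List.find?_cons, h2, ih]

theorem pv_get?_erase {ν : Type} (d : PySem.Dict String ν) (k k' : String) :
    (d.erase k).get? k' = if k' = k then none else d.get? k' := by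
  by_cases h : k' = k
  · subst h
    simp only [if_pos rfl, PySem.Dict.erase, PySem.Dict.get?]
    have : (d.items.filter (fun p => !(p.1 == k'))).find? (fun p => p.1 == k') = none := by
      rw [List.find?_eq_none]
      intro p hp
      have := List.of_mem_filter hp
      simpa using this
    simp [this]
  · simp only [if_neg h, PySem.Dict.erase, PySem.Dict.get?]
    rw [pv_find?_filter_ne d.items k k' h]

theorem pv_keys_erase_nodup {ν : Type} (d : PySem.Dict String ν) (k : String)
    (h : d.keys.Nodup) : (d.erase k).keys.Nodup := by
  have : (d.erase k).keys = d.keys.filter (fun x => !(x == k)) := by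
    simp only [PySem.Dict.erase, PySem.Dict.keys, List.filter_map]
    rfl
  rw [this]
  exact h.filter _

-- ---- pvOpt / getD bridge ----
theorem pv_getD_eq_of_get?_opt {d : PySem.Dict String (List Int)} {k : String} {l : List Int}
    (h : d.get? k = pvOpt l) : d.getD k [] = l := by
  unfold pvOpt at h
  split_ifs at h with hl
  · subst hl; rw [PySem.Dict.getD_eq_get?_getD, h]; rfl
  · rw [PySem.Dict.getD_eq_get?_getD, h]; rfl

-- ---- slices as maps over index ranges ----
theorem pv_slice_eq_map (labels : List String) (a b : Int) (h0 : 0 ≤ a) (hb0 : 0 ≤ b)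
    (hb : b ≤ (labels.length : Int)) :
    PySem.List.slice labels (some a) (some b)
      = (PySem.List.pyRange a b 1).map (fun j => pvF labels j) := by
  rcases le_or_gt b a with hba | hab
  · rw [PySem.List.pyRange_one_eq_nil hba, PySem.List.slice_toNat labels h0 hb0]
    have : b.toNat - a.toNat = 0 := by omega
    simp [this]
  · -- a < b ≤ len
    have hlen : a.toNat ≤ labels.length := by omega
    rw [PySem.List.slice_toNat labels h0 hb0, PySem.List.pyRange_one a b]
    have hcast : ((b - a).toNat) = b.toNat - a.toNat := by omega
    apply List.ext_getElem
    · simp [hcast]; omega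
    · intro n h1 h2
      simp only [List.getElem_take, List.getElem_drop, List.getElem_map, List.getElem_range]
      unfold pvF
      have hn : n < (b - a).toNat := by simpa using h2
      have : a + (n : Int) = ((a.toNat + n : Nat) : Int) := by omega
      rw [this, PySem.List.pyGetD_natCast]
      have hlt : a.toNat + n < labels.length := by omega
      rw [List.getD_eq_getElem _ _ hlt]

-- ---- window algebra ----
theorem pv_win_succ_no_evict (w i : Int) (h0 : 0 ≤ i) (hw : 0 ≤ w) (h : i < w) :
    pvWin w (i + 1) = pvWin w i ++ [i] := by
  unfold pvWin
  have h1 : max 0 (i + 1 - w) = 0 := by omega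
  have h2 : max 0 (i - w) = 0 := by omega
  rw [h1, h2, PySem.List.pyRange_one_succ_right h0]

theorem pv_win_succ_evict (w i : Int) (hw : 0 ≤ w) (h : w ≤ i) :
    (i - w) :: pvWin w (i + 1) = pvWin w i ++ [i] := by
  unfold pvWin
  have h1 : max 0 (i + 1 - w) = i - w + 1 := by omega
  have h2 : max 0 (i - w) = i - w := by omega
  rw [h1, h2, ← PySem.List.pyRange_one_cons (show i - w < i + 1 by omega),
    PySem.List.pyRange_one_succ_right (by omega)]

theorem pv_win_pairwise (w i : Int) : (pvWin w i).Pairwise (· < ·) :=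
  PySem.List.pairwise_lt_pyRange_one _ _

theorem pv_winD_pairwise (labels : List String) (dw i : Int) :
    (pvWinD labels dw i).Pairwise (· < ·) :=
  (pv_win_pairwise dw i).filter _

theorem pv_win_ne_nil (w i : Int) (h0 : 0 ≤ i) (hw : 1 ≤ w) : pvWin w (i + 1) ≠ [] := by
  unfold pvWin
  intro h
  have := congrArg List.length h
  rw [PySem.List.length_pyRange_one] at this
  simp at this
  omega


-- ---- A's Counter-mode characterised: max count, first occurrence on ties ----
-- insertBy unfolding on a cons
theorem pv_insertBy_cons (bef : (String × Int) → (String × Int) → Bool) (x y : String × Int) (ys : List (String × Int)) :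
    PySem.List.insertBy bef x (y :: ys) = if bef x y then x :: y :: ys else y :: PySem.List.insertBy bef x ys := by
  simp [PySem.List.insertBy]

-- head of the reverse-sorting insertion fold is the first-strict-max fold
theorem pv_foldl_insertBy_head (l : List (String × Int)) :
    ∀ (a : String × Int) (as : List (String × Int)), ∃ bs,
      l.foldl (fun acc x => PySem.List.insertBy (fun p q => decide (q.2 < p.2)) x acc) (a :: as)
        = (l.foldl (fun b x => if b.2 < x.2 then x else b) a) :: bs := by
  induction l with
  | nil => intro a as; exact ⟨as, rfl⟩
  | cons x xs ih =>
    intro a as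
    by_cases h : a.2 < x.2
    · obtain ⟨bs, hbs⟩ := ih x (a :: as)
      refine ⟨bs, ?_⟩
      simp only [List.foldl_cons, pv_insertBy_cons, h, decide_true, if_true]
      exact hbs
    · obtain ⟨bs, hbs⟩ := ih a (PySem.List.insertBy (fun p q => decide (q.2 < p.2)) x as)
      refine ⟨bs, ?_⟩
      simp only [List.foldl_cons, pv_insertBy_cons, h, decide_false, if_false]
      exact hbs

-- the pair fold over mapped pairs is the key fold over the keys
theorem pv_foldl_pairs (cnt : String → Int) (d : List String) :
    ∀ k0 : String,
      (d.map (fun k => (k, cnt k))).foldl (fun b x => if b.2 < x.2 then x else b) (k0, cnt k0)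
        = (d.foldl (fun b x => if cnt b < cnt x then x else b) k0,
           cnt (d.foldl (fun b x => if cnt b < cnt x then x else b) k0)) := by
  induction d with
  | nil => intro k0; rfl
  | cons x xs ih =>
    intro k0
    by_cases h : cnt k0 < cnt x <;> simp [List.foldl_cons, h, ih]

-- the first-strict-max fold bounds every element and is the first element attaining the max
theorem pv_firstMax_spec (cnt : String → Int) (d : List String) :
    ∀ k0 : String,
      (∀ y ∈ k0 :: d, cnt y ≤ cnt (d.foldl (fun b x => if cnt b < cnt x then x else b) k0)) ∧
      (k0 :: d).find? (fun y => decide (cnt (d.foldl (fun b x => if cnt b < cnt x then x else b) k0) ≤ cnt y))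
        = some (d.foldl (fun b x => if cnt b < cnt x then x else b) k0) := by
  induction d with
  | nil =>
    intro k0
    refine ⟨by simp, ?_⟩
    simp [List.find?_cons]
  | cons x xs ih =>
    intro k0
    by_cases h : cnt k0 < cnt x
    · obtain ⟨hb, hf⟩ := ih x
      have hK : cnt x ≤ cnt (xs.foldl (fun b x => if cnt b < cnt x then x else b) x) := hb x (by simp)
      refine ⟨?_, ?_⟩
      · intro y hy
        rcases List.mem_cons.mp hy with rfl | hy
        · simp only [List.foldl_cons, if_pos h]; omega
        · simpa [List.foldl_cons, if_pos h] using hb y hy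
      · have hk0 : (decide (cnt (xs.foldl (fun b x => if cnt b < cnt x then x else b) x) ≤ cnt k0)) = false := by
          simp; omega
        simp only [List.foldl_cons, if_pos h]
        rw [List.find?_cons, hk0]
        exact hf
    · obtain ⟨hb, hf⟩ := ih k0
      have hK0 : cnt k0 ≤ cnt (xs.foldl (fun b x => if cnt b < cnt x then x else b) k0) := hb k0 (by simp)
      refine ⟨?_, ?_⟩
      · intro y hy
        rcases List.mem_cons.mp hy with rfl | hy
        · simpa [List.foldl_cons, if_neg h] using hb y (by simp)
        · rcases List.mem_cons.mp hy with rfl | hy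
          · simp only [List.foldl_cons, if_neg h]; omega
          · simpa [List.foldl_cons, if_neg h] using hb y (by simp [hy])
      · by_cases htop : cnt (xs.foldl (fun b x => if cnt b < cnt x then x else b) k0) ≤ cnt k0
        · have : (k0 :: xs).find?
              (fun y => decide (cnt (xs.foldl (fun b x => if cnt b < cnt x then x else b) k0) ≤ cnt y)) = some k0 := by
            rw [List.find?_cons]; simp [htop]
          have hKk0 : xs.foldl (fun b x => if cnt b < cnt x then x else b) k0 = k0 := by
            rw [this] at hf; exact (Option.some_inj.mp hf).symm
          simp only [List.foldl_cons, if_neg h, hKk0]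
          rw [List.find?_cons]; simp [htop]
        · have hxfalse : (decide (cnt (xs.foldl (fun b x => if cnt b < cnt x then x else b) k0) ≤ cnt x)) = false := by
            simp; omega
          have hk0false : (decide (cnt (xs.foldl (fun b x => if cnt b < cnt x then x else b) k0) ≤ cnt k0)) = false := by
            simp; omega
          have htail : xs.find?
              (fun y => decide (cnt (xs.foldl (fun b x => if cnt b < cnt x then x else b) k0) ≤ cnt y))
                = some (xs.foldl (fun b x => if cnt b < cnt x then x else b) k0) := by
            rw [List.find?_cons, hk0false] at hf; exact hf
          simp only [List.foldl_cons, if_neg h]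
          rw [List.find?_cons, hk0false, List.find?_cons, hxfalse]
          exact htail

-- find? ignores removal of elements failing the predicate
theorem pv_find?_discard (p : String → Bool) (x : String) (hx : p x = false) (l : List String) :
    (PySem.Set.discard l x).find? p = l.find? p := by
  induction l with
  | nil => rfl
  | cons y ys ih =>
    by_cases hyx : y = x
    · subst hyx
      simpa [PySem.Set.discard, List.find?_cons, hx] using ih
    · by_cases hpy : p y
      · simp [PySem.Set.discard, List.filter_cons, hyx, List.find?_cons, hpy]
      · have hpy' : p y = false := by simpa using hpy
        have hby : (y == x) = false := by simpa using hyx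
        simp only [PySem.Set.discard] at ih ⊢
        rw [List.filter_cons]
        simp only [hby, Bool.not_false, if_true]
        simp only [List.find?_cons, hpy']
        exact ih

-- find? over the deduplicated list is find? over the list
theorem pv_find?_dedup (p : String → Bool) (xs : List String) :
    (PySem.Set.ofList xs).find? p = xs.find? p := by
  induction xs with
  | nil => rfl
  | cons x xs ih =>
    rw [PySem.Set.ofList_cons]
    by_cases hpx : p x
    · rw [List.find?_cons, List.find?_cons]; simp [hpx]
    · simp only [Bool.not_eq_true] at hpx
      rw [List.find?_cons, List.find?_cons]
      simp only [hpx]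
      rw [pv_find?_discard p x hpx, ih]

-- CORE (A side): Counter(win).most_common(1)[0][0] has the maximal count and is the FIRST
-- element of win attaining it
theorem pv_modeA_char (win : List String) (hne : win ≠ []) :
    (∀ y ∈ win, ((win.count y : Int)) ≤ ((win.count (pvMostCommon1A win) : Int))) ∧
    win.find? (fun y => decide (((win.count (pvMostCommon1A win) : Int)) ≤ ((win.count y : Int)))) = some (pvMostCommon1A win) := by
  classical
  set cnt : String → Int := fun k => (win.count k : Int) with hcnt
  obtain ⟨w0, wrest, hwin⟩ := List.exists_cons_of_ne_nil hne
  have hdne : PySem.List.dedup win ≠ [] := by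
    intro h0
    have : w0 ∈ PySem.List.dedup win := (PySem.List.mem_dedup win w0).mpr (by simp [hwin])
    rw [h0] at this
    simp at this
  obtain ⟨d0, drest, hd⟩ := List.exists_cons_of_ne_nil hdne
  set K : String := drest.foldl (fun b x => if cnt b < cnt x then x else b) d0 with hK
  obtain ⟨hbound, hfindD⟩ := pv_firstMax_spec cnt drest d0
  have hboundwin : ∀ y ∈ win, cnt y ≤ cnt K := by
    intro y hy
    have hyd : y ∈ d0 :: drest := by
      have h1 : y ∈ PySem.List.dedup win := (PySem.List.mem_dedup win y).mpr hy
      rwa [hd] at h1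
    rw [hK]
    exact hbound y hyd
  have hitems : (PySem.Dict.counter win).items = (d0 :: drest).map (fun k => (k, cnt k)) := by
    rw [PySem.Dict.items_counter, ← PySem.List.dedup_eq_ofList, hd]
  have hA : pvMostCommon1A win = K := by
    unfold pvMostCommon1A
    rw [PySem.List.sorted_rev_eq_foldl_insertBy, hitems]
    simp only [List.map_cons, List.foldl_cons]
    have h1 : PySem.List.insertBy (fun a b => decide ((fun p : String × Int => p.2) b < (fun p : String × Int => p.2) a)) (d0, cnt d0) [] = [(d0, cnt d0)] := by
      simp [PySem.List.insertBy]
    rw [h1]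
    obtain ⟨bs, hbs⟩ := pv_foldl_insertBy_head (drest.map (fun k => (k, cnt k))) (d0, cnt d0) []
    rw [hbs, pv_foldl_pairs cnt drest d0]
  rw [hA]
  refine ⟨hboundwin, ?_⟩
  have hfd : (PySem.Set.ofList win).find? (fun y => decide (cnt K ≤ cnt y)) = some K := by
    rw [← PySem.List.dedup_eq_ofList, hd, hK]
    exact hfindD
  rw [← pv_find?_dedup (fun y => decide (cnt K ≤ cnt y)) win]
  exact hfd

-- ---- counts of a mapped window are lengths of pvLfun ----
theorem pv_count_eq_Lfun_length (labels : List String) (idxs : List Int) (k : String) :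
    (idxs.map (fun j => pvF labels j)).count k = (pvLfun labels idxs k).length := by
  rw [List.count_eq_countP, List.countP_map, pvLfun, List.countP_eq_length_filter]
  rfl

-- ---- pvBestLabel of a list with a unique strict minimum ----
theorem pv_keyLt_irrefl (x : String × List Int) : pvKeyLt x x = false := by
  simp [pvKeyLt]

theorem pv_keyLt_asymm (x y : String × List Int) (h : pvKeyLt x y = true) : pvKeyLt y x = false := by
  simp only [pvKeyLt, decide_eq_true_eq] at h
  simp only [pvKeyLt, decide_eq_false_iff_not]
  omega

theorem pv_best_aux (x : String × List Int) (t : List (String × List Int)) :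
    ∀ b, (b = x ∨ (pvKeyLt x b = true ∧ x ∈ t)) → (∀ y ∈ t, y ≠ x → pvKeyLt x y = true) →
      t.foldl (fun b p => if pvKeyLt p b then p else b) b = x := by
  induction t with
  | nil =>
    intro b hb _
    rcases hb with rfl | ⟨_, hx⟩
    · rfl
    · simp at hx
  | cons p t ih =>
    intro b hb hall
    simp only [List.foldl_cons]
    rcases hb with hbx | ⟨hlt, hx⟩
    · rw [hbx]
      by_cases hp : p = x
      · rw [hp, pv_keyLt_irrefl]
        exact ih x (Or.inl rfl) (fun y hy => hall y (by simp [hy]))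
      · have hlt : pvKeyLt x p = true := hall p (by simp) hp
        rw [pv_keyLt_asymm _ _ hlt]
        exact ih x (Or.inl rfl) (fun y hy => hall y (by simp [hy]))
    · rcases List.mem_cons.mp hx with hxp | hx
      · rw [← hxp, hlt]
        exact ih x (Or.inl rfl) (fun y hy => hall y (by simp [hy]))
      · by_cases hpb : pvKeyLt p b = true
        · rw [hpb]
          by_cases hp : p = x
          · rw [hp]; exact ih x (Or.inl rfl) (fun y hy => hall y (by simp [hy]))
          · exact ih p (Or.inr ⟨hall p (by simp) hp, hx⟩) (fun y hy => hall y (by simp [hy]))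
        · rw [Bool.not_eq_true] at hpb
          rw [hpb]
          exact ih b (Or.inr ⟨hlt, hx⟩) (fun y hy => hall y (by simp [hy]))

theorem pv_best_unique (items : List (String × List Int)) (x : String × List Int)
    (hx : x ∈ items) (h : ∀ y ∈ items, y ≠ x → pvKeyLt x y = true) :
    pvBestLabel items = x.1 := by
  match items, hx with
  | b :: t, hx =>
    have : t.foldl (fun b p => if pvKeyLt p b then p else b) b = x := by
      rcases List.mem_cons.mp hx with hxb | hxt
      · exact pv_best_aux x t b (Or.inl hxb.symm) (fun y hy => h y (by simp [hy]))
      · by_cases hbx : b = x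
        · exact pv_best_aux x t b (Or.inl hbx) (fun y hy => h y (by simp [hy]))
        · exact pv_best_aux x t b (Or.inr ⟨h b (by simp) hbx, hxt⟩) (fun y hy => h y (by simp [hy]))
    rw [pvBestLabel, this]


-- CORE: on a nonempty strictly increasing index window, B's min over any table whose
-- entries are exactly the nonempty per-label index lists equals A's Counter mode
theorem pv_mode_min (labels : List String) (idxs : List Int) (items : List (String × List Int))
    (hinc : idxs.Pairwise (· < ·)) (hne : idxs ≠ [])
    (hmem : ∀ p, p ∈ items ↔ (p.2 = pvLfun labels idxs p.1 ∧ p.2 ≠ [])) :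
    pvBestLabel items = pvMostCommon1A (idxs.map (fun j => pvF labels j)) := by
  classical
  set win := idxs.map (fun j => pvF labels j) with hwin
  have hwne : win ≠ [] := by
    simp only [hwin, ne_eq, List.map_eq_nil_iff]
    exact hne
  obtain ⟨hbound, hfind⟩ := pv_modeA_char win hwne
  set K := pvMostCommon1A win with hKdef
  have hKmem : K ∈ win := List.mem_of_find?_eq_some hfind
  obtain ⟨j0, hj0, hfj0⟩ := List.mem_map.mp hKmem
  have hLK : pvLfun labels idxs K ≠ [] := by
    intro h0
    have hj0' : j0 ∈ pvLfun labels idxs K := List.mem_filter.mpr ⟨hj0, by simp [hfj0]⟩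
    rw [h0] at hj0'
    simp at hj0'
  have hcnt : ∀ k, win.count k = (pvLfun labels idxs k).length :=
    fun k => pv_count_eq_Lfun_length labels idxs k
  -- decompose win at the first max-count element
  obtain ⟨hpK, pre, suf, hsplit, hpre⟩ := List.find?_eq_some_iff_append.mp hfind
  obtain ⟨ia, rest, hidxs, hmia, hmrest⟩ := List.map_eq_append_iff.mp hsplit
  obtain ⟨j, ib, hrest, hfj, hmib⟩ := List.map_eq_cons_iff.mp hmrest
  have hprelt : ∀ a ∈ pre, win.count a < win.count K := by
    intro a ha
    have := hpre a ha
    simp only [Bool.not_eq_eq_eq_not, Bool.not_true, decide_eq_false_iff_not, not_le] at this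
    exact_mod_cast this
  have hLia : ∀ k, win.count k = win.count K → pvLfun labels ia k = [] := by
    intro k hk
    rw [pvLfun, List.filter_eq_nil_iff]
    intro a ha
    simp only [beq_iff_eq]
    intro hfa
    have : pvF labels a ∈ pre := by rw [← hmia]; exact List.mem_map_of_mem ha
    have := hprelt _ this
    rw [hfa, hk] at this
    omega
  have hLsplitK : pvLfun labels idxs K = j :: pvLfun labels ib K := by
    rw [hidxs, hrest, pvLfun, List.filter_append, List.filter_cons]
    rw [← pvLfun, ← pvLfun, hLia K rfl]
    simp [hfj]
  set x : String × List Int := (K, pvLfun labels idxs K) with hxdef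
  have hx : x ∈ items := (hmem x).mpr ⟨rfl, hLK⟩
  have hneq : ∀ y ∈ items, y ≠ x → pvKeyLt x y = true := by
    intro y hy hyx
    obtain ⟨hy2, hyne⟩ := (hmem y).mp hy
    have hy1 : y.1 ≠ K := by
      intro h1
      apply hyx
      have : y = (y.1, y.2) := rfl
      rw [this, hy2, h1, hxdef]
    have hymem : y.1 ∈ win := by
      obtain ⟨a, ha⟩ := List.exists_mem_of_ne_nil _ (hy2 ▸ hyne)
      have := List.mem_filter.mp ha
      rw [hwin]
      exact List.mem_map.mpr ⟨a, this.1, by simpa using this.2⟩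
    have hle : win.count y.1 ≤ win.count K := by
      have := hbound y.1 hymem
      exact_mod_cast this
    rcases Nat.lt_or_ge (win.count y.1) (win.count K) with hlt | hge
    · -- strictly smaller count
      simp only [pvKeyLt, decide_eq_true_eq]
      left
      rw [hxdef]
      simp only [hy2, ← hcnt]
      exact hlt
    · have heq : win.count y.1 = win.count K := le_antisymm hle hge
      have hLy : pvLfun labels idxs y.1 = pvLfun labels ib y.1 := by
        rw [hidxs, hrest, pvLfun, List.filter_append, List.filter_cons]
        rw [← pvLfun, ← pvLfun, hLia y.1 heq]
        have : (pvF labels j == y.1) = false := by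
          simp [hfj, Ne.symm hy1]
        simp [this]
      have hjlt : ∀ b ∈ ib, j < b := by
        have hsub : (j :: ib).Sublist idxs := by
          rw [hidxs, hrest]
          exact List.sublist_append_right _ _
        have := (List.pairwise_cons.mp (hinc.sublist hsub)).1
        exact this
      have hyne' : pvLfun labels ib y.1 ≠ [] := by rw [← hLy, ← hy2]; exact hyne
      have hhead : y.2.headD 0 ∈ ib := by
        rw [hy2, hLy]
        have h1 : (pvLfun labels ib y.1).headD 0 ∈ pvLfun labels ib y.1 := by
          cases hys : pvLfun labels ib y.1 with
          | nil => exact absurd hys hyne'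
          | cons a t => simp [hys]
        rw [pvLfun] at h1
        exact List.mem_of_mem_filter h1
      simp only [pvKeyLt, decide_eq_true_eq]
      right
      constructor
      · rw [hxdef]
        simp only [hy2, ← hcnt, heq]
      · have : x.2.headD 0 = j := by rw [hxdef]; simp [hLsplitK]
        rw [this]
        exact hjlt _ hhead
  rw [pv_best_unique items x hx hneq]


-- ---- pvLfun structure ----
theorem pv_Lfun_nil (labels : List String) (k : String) : pvLfun labels [] k = [] := rfl

theorem pv_Lfun_append (labels : List String) (xs ys : List Int) (k : String) :
    pvLfun labels (xs ++ ys) k = pvLfun labels xs k ++ pvLfun labels ys k := by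
  simp [pvLfun, List.filter_append]

theorem pv_Lfun_cons (labels : List String) (j : Int) (rest : List Int) (k : String) :
    pvLfun labels (j :: rest) k
      = if pvF labels j == k then j :: pvLfun labels rest k else pvLfun labels rest k := by
  rw [pvLfun, List.filter_cons]
  split <;> rfl

-- ---- the two table updates preserve the get?-characterisation ----
theorem pv_insert_spec (labels : List String) (w : List Int) (i : Int)
    (pos : PySem.Dict String (List Int))
    (hspec : ∀ k, pos.get? k = pvOpt (pvLfun labels w k)) (k : String) :
    (pos.insert (pvF labels i) (pos.getD (pvF labels i) [] ++ [i])).get? k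
      = pvOpt (pvLfun labels (w ++ [i]) k) := by
  have hgetD : pos.getD (pvF labels i) [] = pvLfun labels w (pvF labels i) :=
    pv_getD_eq_of_get?_opt (hspec _)
  rw [PySem.Dict.get?_insert, pv_Lfun_append, pv_Lfun_cons, pv_Lfun_nil]
  by_cases hk : k = pvF labels i
  · subst hk
    rw [if_pos rfl, hgetD, if_pos (by simp), pvOpt, if_neg (by simp)]
  · rw [if_neg hk, if_neg (by simp [Ne.symm hk]), List.append_nil, hspec]

theorem pv_evict_spec (labels : List String) (lo : Int) (t : String → List Int)
    (pos : PySem.Dict String (List Int))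
    (hspec : ∀ k, pos.get? k = pvOpt (if pvF labels lo == k then lo :: t k else t k)) (k : String) :
    ((if (pos.getD (pvF labels lo) []).drop 1 = []
        then pos.erase (pvF labels lo)
        else pos.insert (pvF labels lo) ((pos.getD (pvF labels lo) []).drop 1)).get? k)
      = pvOpt (t k) := by
  have hgetD : pos.getD (pvF labels lo) [] = lo :: t (pvF labels lo) := by
    have h1 := hspec (pvF labels lo)
    rw [if_pos (by simp)] at h1
    have := pv_getD_eq_of_get?_opt h1
    simpa using this
  rw [hgetD]
  simp only [List.drop_one, List.tail_cons]
  by_cases hk : k = pvF labels lo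
  · subst hk
    split_ifs with hnil
    · rw [pv_get?_erase, if_pos rfl, hnil, pvOpt, if_pos rfl]
    · rw [PySem.Dict.get?_insert_self, pvOpt, if_neg hnil]
  · have hbeq : (pvF labels lo == k) = false := by simp [Ne.symm hk]
    split_ifs with hnil
    · rw [pv_get?_erase, if_neg hk, hspec, hbeq]
      simp
    · rw [PySem.Dict.get?_insert_of_ne _ _ hk, hspec, hbeq]
      simp

-- ---- table items from the characterisation ----
theorem pv_items_nil_iff (labels : List String) (idxs : List Int)
    (d : PySem.Dict String (List Int)) (hnd : d.keys.Nodup)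
    (hspec : ∀ k, d.get? k = pvOpt (pvLfun labels idxs k)) :
    d.items = [] ↔ idxs = [] := by
  constructor
  · intro hit
    cases hidxs : idxs with
    | nil => rfl
    | cons j rest =>
      exfalso
      have h1 : j ∈ pvLfun labels idxs (pvF labels j) := by
        rw [hidxs]
        exact List.mem_filter.mpr ⟨by simp, by simp⟩
      have h2 : pvLfun labels idxs (pvF labels j) ≠ [] := by
        intro h0; rw [h0] at h1; simp at h1
      have h3 : d.get? (pvF labels j) = some (pvLfun labels idxs (pvF labels j)) := by
        rw [hspec, pvOpt, if_neg h2]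
      have := PySem.Dict.mem_items_of_get?_eq_some d h3
      rw [hit] at this
      simp at this
  · intro hidxs
    subst hidxs
    cases hit : d.items with
    | nil => rfl
    | cons p r =>
      exfalso
      have hp : (p.1, p.2) ∈ d.items := by rw [hit]; simp
      have := PySem.Dict.get?_of_mem_items d hp hnd
      rw [hspec] at this
      simp [pvLfun, pvOpt] at this

theorem pv_items_mem_char (labels : List String) (idxs : List Int)
    (d : PySem.Dict String (List Int)) (hnd : d.keys.Nodup)
    (hspec : ∀ k, d.get? k = pvOpt (pvLfun labels idxs k)) (p : String × List Int) :
    p ∈ d.items ↔ (p.2 = pvLfun labels idxs p.1 ∧ p.2 ≠ []) := by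
  have h1 : p ∈ d.items ↔ d.get? p.1 = some p.2 := by
    constructor
    · intro hp
      exact PySem.Dict.get?_of_mem_items d (show (p.1, p.2) ∈ d.items from hp) hnd
    · intro hp
      exact PySem.Dict.mem_items_of_get?_eq_some d hp
  rw [h1, hspec, pvOpt]
  split_ifs with hnil
  · constructor
    · intro h; simp at h
    · intro ⟨h2, h3⟩; exact absurd (h2.trans hnil) h3
  · constructor
    · intro h
      have := (Option.some_inj.mp h).symm
      exact ⟨this, by rw [this]; exact hnil⟩
    · intro ⟨h2, _⟩; rw [h2]


-- ---- A's loop as a map of its per-index value ----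
def pvAVal (labels : List String) (window downtrend_window i : Int) : String :=
  let down_w := min downtrend_window (i + 1)
  let recent_short := PySem.List.slice labels (some (max 0 (i - down_w + 1))) (some (i + 1))
  let downtrend_labels := recent_short.filter (fun l => PySem.Str.startswith l "DOWNTREND")
  if downtrend_labels ≠ [] then pvMostCommon1A downtrend_labels
  else
    let normal_w := min window (i + 1)
    let recent := PySem.List.slice labels (some (max 0 (i - normal_w + 1))) (some (i + 1))
    pvMostCommon1A recent

theorem pv_foldl_append_map_aux (F : List String → Int → List String) (g : Int → String)
    (hF : ∀ acc i, F acc i = acc ++ [g i]) (l : List Int) :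
    ∀ acc : List String, l.foldl F acc = acc ++ l.map g := by
  induction l with
  | nil => intro acc; simp
  | cons x xs ih =>
    intro acc
    rw [List.foldl_cons, hF, ih]
    simp

theorem pv_A_as_map (labels : List String) (window downtrend_window : Int) :
    smooth_regime_labels_asymmetric_py labels window downtrend_window
      = (PySem.List.pyRange 0 (labels.length : Int) 1).map (pvAVal labels window downtrend_window) := by
  unfold smooth_regime_labels_asymmetric_py
  rw [pv_foldl_append_map_aux _ (pvAVal labels window downtrend_window) ?_ _ []]
  · simp
  · intro acc i
    unfold pvAVal
    dsimp only
    split <;> rfl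

-- ---- empty window for a non-positive lookback ----
theorem pv_win_nonpos (w i : Int) (hw : w ≤ 0) (h0 : 0 ≤ i) : pvWin w i = [] := by
  apply PySem.List.pyRange_one_eq_nil
  omega

theorem pv_evict_nodup {old : String} {ps : List Int} (pos : PySem.Dict String (List Int))
    (hnd : pos.keys.Nodup) :
    (if ps = [] then pos.erase old else pos.insert old ps).keys.Nodup := by
  split_ifs
  · exact pv_keys_erase_nodup pos old hnd
  · exact PySem.Dict.nodup_keys_insert pos old ps hnd

-- B's per-step table read equals A's per-index value
theorem pv_emit (labels : List String) (window dw i : Int)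
    (h0 : 0 ≤ i) (hilen : i < (labels.length : Int)) (hw : 0 ≤ window)
    (hpre2 : 1 ≤ window ∨ pvWinD labels dw (i + 1) ≠ [])
    (pos dpos : PySem.Dict String (List Int))
    (hinv : pvInv labels window dw (i + 1) pos dpos) :
    pvBestLabel ((if dpos.items ≠ [] then dpos else pos).items) = pvAVal labels window dw i := by
  obtain ⟨hnd1, hnd2, hs1, hs2⟩ := hinv
  have hlen1 : 0 ≤ i + 1 := by omega
  have hloD : max 0 (i - min dw (i + 1) + 1) = max 0 (i + 1 - dw) := by omega
  have hshort : PySem.List.slice labels (some (max 0 (i - min dw (i + 1) + 1))) (some (i + 1))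
      = (pvWin dw (i + 1)).map (fun j => pvF labels j) := by
    rw [hloD, pv_slice_eq_map labels _ _ (le_max_left 0 _) hlen1 (by omega)]
    rfl
  have hdlabels : (PySem.List.slice labels (some (max 0 (i - min dw (i + 1) + 1))) (some (i + 1))).filter
        (fun l => PySem.Str.startswith l "DOWNTREND")
      = (pvWinD labels dw (i + 1)).map (fun j => pvF labels j) := by
    rw [hshort, List.filter_map]
    rfl
  have hbr : dpos.items = [] ↔ pvWinD labels dw (i + 1) = [] :=
    pv_items_nil_iff labels _ dpos hnd2 hs2
  unfold pvAVal
  dsimp only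
  rw [hdlabels]
  by_cases hd : dpos.items = []
  · -- normal branch
    have hWD : pvWinD labels dw (i + 1) = [] := hbr.mp hd
    have hwin1 : 1 ≤ window := by
      rcases hpre2 with h | h
      · exact h
      · exact absurd hWD h
    rw [if_neg (show ¬ dpos.items ≠ [] by simp [hd]), hWD]
    rw [if_neg (by simp)]
    have hloN : max 0 (i - min window (i + 1) + 1) = max 0 (i + 1 - window) := by omega
    have hrecent : PySem.List.slice labels (some (max 0 (i - min window (i + 1) + 1))) (some (i + 1))
        = (pvWin window (i + 1)).map (fun j => pvF labels j) := by
      rw [hloN, pv_slice_eq_map labels _ _ (le_max_left 0 _) hlen1 (by omega)]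
      rfl
    rw [hrecent]
    exact pv_mode_min labels _ pos.items (pv_win_pairwise _ _) (pv_win_ne_nil window i h0 hwin1)
      (pv_items_mem_char labels _ pos hnd1 hs1)
  · -- downtrend branch
    have hWD : pvWinD labels dw (i + 1) ≠ [] := fun h => hd (hbr.mpr h)
    rw [if_pos hd, if_pos (by simp [hWD])]
    exact pv_mode_min labels _ dpos.items (pv_winD_pairwise labels dw (i + 1)) hWD
      (pv_items_mem_char labels _ dpos hnd2 hs2)


-- proof-side mirrors of the two table-update phases of pvStepB (definitionally equal
-- to the corresponding subterms of pvStepB)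
def pvPPhase (labels : List String) (window i : Int)
    (pos : PySem.Dict String (List Int)) : PySem.Dict String (List Int) :=
  let pos1 := pos.insert (pvF labels i) (pos.getD (pvF labels i) [] ++ [i])
  if window ≤ i then
    let ps := (pos1.getD (pvF labels (i - window)) []).drop 1
    if ps = [] then pos1.erase (pvF labels (i - window))
    else pos1.insert (pvF labels (i - window)) ps
  else pos1

def pvDPhase (labels : List String) (dw i : Int)
    (dpos : PySem.Dict String (List Int)) : PySem.Dict String (List Int) :=
  if 0 < dw then
    let dposA := if PySem.Str.startswith (pvF labels i) "DOWNTREND"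
      then dpos.insert (pvF labels i) (dpos.getD (pvF labels i) [] ++ [i]) else dpos
    if dw ≤ i then
      if PySem.Str.startswith (pvF labels (i - dw)) "DOWNTREND" then
        let ds := (dposA.getD (pvF labels (i - dw)) []).drop 1
        if ds = [] then dposA.erase (pvF labels (i - dw))
        else dposA.insert (pvF labels (i - dw)) ds
      else dposA
    else dposA
  else dpos

theorem pv_pphase_facts (labels : List String) (window i : Int) (h0 : 0 ≤ i) (hw : 0 ≤ window)
    (pos : PySem.Dict String (List Int)) (hnd : pos.keys.Nodup)
    (hs : ∀ k, pos.get? k = pvOpt (pvLfun labels (pvWin window i) k)) :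
    (∀ k, (pvPPhase labels window i pos).get? k
        = pvOpt (pvLfun labels (pvWin window (i + 1)) k))
    ∧ (pvPPhase labels window i pos).keys.Nodup := by
  have hnd1 : (pos.insert (pvF labels i) (pos.getD (pvF labels i) [] ++ [i])).keys.Nodup :=
    PySem.Dict.nodup_keys_insert pos _ _ hnd
  dsimp only [pvPPhase]
  by_cases hev : window ≤ i
  · rw [if_pos hev]
    have hmid : ∀ k, (pos.insert (pvF labels i) (pos.getD (pvF labels i) [] ++ [i])).get? k
        = pvOpt (if pvF labels (i - window) == k
            then (i - window) :: pvLfun labels (pvWin window (i + 1)) k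
            else pvLfun labels (pvWin window (i + 1)) k) := by
      intro k
      rw [pv_insert_spec labels (pvWin window i) i pos hs k,
        ← pv_win_succ_evict window i hw hev, pv_Lfun_cons]
    exact ⟨pv_evict_spec labels (i - window) _ _ hmid, pv_evict_nodup _ hnd1⟩
  · rw [if_neg hev]
    refine ⟨?_, hnd1⟩
    intro k
    rw [pv_win_succ_no_evict window i h0 hw (by omega)]
    exact pv_insert_spec labels (pvWin window i) i pos hs k

theorem pv_dphase_facts (labels : List String) (dw i : Int) (h0 : 0 ≤ i)
    (dpos : PySem.Dict String (List Int)) (hnd : dpos.keys.Nodup)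
    (hs : ∀ k, dpos.get? k = pvOpt (pvLfun labels (pvWinD labels dw i) k)) :
    (∀ k, (pvDPhase labels dw i dpos).get? k
        = pvOpt (pvLfun labels (pvWinD labels dw (i + 1)) k))
    ∧ (pvDPhase labels dw i dpos).keys.Nodup := by
  dsimp only [pvDPhase]
  by_cases hdw : 0 < dw
  · rw [if_pos hdw]
    by_cases hsdi : PySem.Str.startswith (pvF labels i) "DOWNTREND" = true
    · rw [if_pos hsdi]
      have hmidA := pv_insert_spec labels (pvWinD labels dw i) i dpos hs
      have hndA := PySem.Dict.nodup_keys_insert dpos (pvF labels i) (dpos.getD (pvF labels i) [] ++ [i]) hnd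
      by_cases hdev : dw ≤ i
      · rw [if_pos hdev]
        by_cases hsdlo : PySem.Str.startswith (pvF labels (i - dw)) "DOWNTREND" = true
        · rw [if_pos hsdlo]
          have halg : pvWinD labels dw i ++ [i] = (i - dw) :: pvWinD labels dw (i + 1) := by
            have h1 := congrArg (List.filter (fun j => PySem.Str.startswith (pvF labels j) "DOWNTREND"))
              (pv_win_succ_evict dw i (by omega) hdev)
            simp only [List.filter_append, List.filter_cons, List.filter_nil, hsdi, hsdlo,
              if_true] at h1
            exact h1.symm
          have hmidA' : ∀ k, (dpos.insert (pvF labels i) (dpos.getD (pvF labels i) [] ++ [i])).get? k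
              = pvOpt (if pvF labels (i - dw) == k
                  then (i - dw) :: pvLfun labels (pvWinD labels dw (i + 1)) k
                  else pvLfun labels (pvWinD labels dw (i + 1)) k) := by
            intro k
            rw [hmidA k, halg, pv_Lfun_cons]
          exact ⟨pv_evict_spec labels (i - dw) _ _ hmidA', pv_evict_nodup _ hndA⟩
        · rw [if_neg hsdlo]
          have halg : pvWinD labels dw i ++ [i] = pvWinD labels dw (i + 1) := by
            have h1 := congrArg (List.filter (fun j => PySem.Str.startswith (pvF labels j) "DOWNTREND"))
              (pv_win_succ_evict dw i (by omega) hdev)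
            simp only [List.filter_append, List.filter_cons, List.filter_nil, hsdi, hsdlo,
              if_true, Bool.false_eq_true, if_false] at h1
            exact h1.symm
          exact ⟨fun k => by rw [hmidA k, halg], hndA⟩
      · rw [if_neg hdev]
        have halg : pvWinD labels dw i ++ [i] = pvWinD labels dw (i + 1) := by
          have h1 := congrArg (List.filter (fun j => PySem.Str.startswith (pvF labels j) "DOWNTREND"))
            (pv_win_succ_no_evict dw i h0 (by omega) (by omega))
          simp only [List.filter_append, List.filter_cons, List.filter_nil, hsdi, if_true] at h1
          exact h1.symm
        exact ⟨fun k => by rw [hmidA k, halg], hndA⟩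
    · rw [if_neg hsdi]
      by_cases hdev : dw ≤ i
      · rw [if_pos hdev]
        by_cases hsdlo : PySem.Str.startswith (pvF labels (i - dw)) "DOWNTREND" = true
        · rw [if_pos hsdlo]
          have halg : pvWinD labels dw i = (i - dw) :: pvWinD labels dw (i + 1) := by
            have h1 := congrArg (List.filter (fun j => PySem.Str.startswith (pvF labels j) "DOWNTREND"))
              (pv_win_succ_evict dw i (by omega) hdev)
            simp only [List.filter_append, List.filter_cons, List.filter_nil, hsdi, hsdlo,
              if_true, Bool.false_eq_true, if_false, List.append_nil] at h1
            exact h1.symm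
          have hmid' : ∀ k, dpos.get? k
              = pvOpt (if pvF labels (i - dw) == k
                  then (i - dw) :: pvLfun labels (pvWinD labels dw (i + 1)) k
                  else pvLfun labels (pvWinD labels dw (i + 1)) k) := by
            intro k
            rw [hs k, halg, pv_Lfun_cons]
          exact ⟨pv_evict_spec labels (i - dw) _ _ hmid', pv_evict_nodup _ hnd⟩
        · rw [if_neg hsdlo]
          have halg : pvWinD labels dw i = pvWinD labels dw (i + 1) := by
            have h1 := congrArg (List.filter (fun j => PySem.Str.startswith (pvF labels j) "DOWNTREND"))
              (pv_win_succ_evict dw i (by omega) hdev)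
            simp only [List.filter_append, List.filter_cons, List.filter_nil, hsdi, hsdlo,
              Bool.false_eq_true, if_false, List.append_nil] at h1
            exact h1.symm
          exact ⟨fun k => by rw [hs k, halg], hnd⟩
      · rw [if_neg hdev]
        have halg : pvWinD labels dw (i + 1) = pvWinD labels dw i := by
          have h1 := congrArg (List.filter (fun j => PySem.Str.startswith (pvF labels j) "DOWNTREND"))
            (pv_win_succ_no_evict dw i h0 (by omega) (by omega))
          simp only [List.filter_append, List.filter_cons, List.filter_nil, hsdi, Bool.false_eq_true, if_false,
            List.append_nil] at h1
          exact h1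
        exact ⟨fun k => by rw [hs k, halg], hnd⟩
  · rw [if_neg hdw]
    have hW0 : pvWinD labels dw i = [] := by
      unfold pvWinD
      rw [pv_win_nonpos dw i (by omega) h0, List.filter_nil]
    have hW1 : pvWinD labels dw (i + 1) = [] := by
      unfold pvWinD
      rw [pv_win_nonpos dw (i + 1) (by omega) (by omega), List.filter_nil]
    refine ⟨?_, hnd⟩
    intro k
    rw [hs k, hW0, hW1]


-- Pre_'s always-a-downtrend disjunct, read at index m
theorem pv_pre_short (labels : List String) (dw : Int) (m : Nat) (hm : m < labels.length)
    (h : ∃ l ∈ PySem.List.slice labels (some (max 0 ((m : Int) - min dw ((m : Int) + 1) + 1))) (some ((m : Int) + 1)),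
      PySem.Str.startswith l "DOWNTREND" = true) :
    pvWinD labels dw ((m : Int) + 1) ≠ [] := by
  obtain ⟨l, hl, hsd⟩ := h
  have h0 : (0 : Int) ≤ (m : Int) := Int.natCast_nonneg m
  have hloD : max 0 ((m : Int) - min dw ((m : Int) + 1) + 1) = max 0 ((m : Int) + 1 - dw) := by omega
  rw [hloD, pv_slice_eq_map labels _ _ (le_max_left 0 _) (by omega) (by exact_mod_cast Nat.succ_le_of_lt hm)] at hl
  obtain ⟨j, hj, hfj⟩ := List.mem_map.mp hl
  intro hnil
  have : j ∈ pvWinD labels dw ((m : Int) + 1) := by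
    unfold pvWinD pvWin
    exact List.mem_filter.mpr ⟨hj, by rw [hfj]; exact hsd⟩
  rw [hnil] at this
  simp at this

-- one iteration of B's loop: the tables keep the invariant and the emitted label is
-- A's per-index value
theorem pv_step_facts (labels : List String) (window dw : Int) (hw : 0 ≤ window)
    (m : Nat) (hm : m < labels.length)
    (hpre2 : 1 ≤ window ∨ pvWinD labels dw ((m : Int) + 1) ≠ [])
    (pos dpos : PySem.Dict String (List Int)) (out : List String)
    (hinv : pvInv labels window dw (m : Int) pos dpos) :
    pvInv labels window dw ((m : Int) + 1)
        (pvStepB labels window dw (pos, dpos, out) ((m : Int), labels[m])).1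
        (pvStepB labels window dw (pos, dpos, out) ((m : Int), labels[m])).2.1
    ∧ (pvStepB labels window dw (pos, dpos, out) ((m : Int), labels[m])).2.2
        = out ++ [pvAVal labels window dw (m : Int)] := by
  obtain ⟨hnd1, hnd2, hs1, hs2⟩ := hinv
  have h0 : (0 : Int) ≤ (m : Int) := Int.natCast_nonneg m
  have hlen : (m : Int) < (labels.length : Int) := by exact_mod_cast hm
  have hlab : labels[m] = pvF labels (m : Int) := by
    unfold pvF
    rw [PySem.List.pyGetD_natCast]
    exact (List.getD_eq_getElem labels "" hm).symm
  have hP := pv_pphase_facts labels window (m : Int) h0 hw pos hnd1 hs1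
  have hD := pv_dphase_facts labels dw (m : Int) h0 dpos hnd2 hs2
  have hinv' : pvInv labels window dw ((m : Int) + 1)
      (pvPPhase labels window (m : Int) pos) (pvDPhase labels dw (m : Int) dpos) :=
    ⟨hP.2, hD.2, hP.1, hD.1⟩
  have hemit := pv_emit labels window dw (m : Int) h0 hlen hw hpre2
      (pvPPhase labels window (m : Int) pos) (pvDPhase labels dw (m : Int) dpos) hinv'
  dsimp only [pvStepB]
  rw [hlab]
  exact ⟨hinv', congrArg (fun s => out ++ [s]) hemit⟩

theorem hlen_aux (labels : List String) (m : Nat) (hm : m < labels.length) :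
    (m : Int) < (labels.length : Int) := by exact_mod_cast hm

-- B's loop over any suffix, given the invariant at its start
theorem pv_B_loop (labels : List String) (window dw : Int) (hw : 0 ≤ window)
    (hpre : 1 ≤ window ∨ ∀ i ∈ List.range labels.length,
      ∃ l ∈ PySem.List.slice labels (some (max 0 ((i : Int) - min dw ((i : Int) + 1) + 1))) (some ((i : Int) + 1)),
        PySem.Str.startswith l "DOWNTREND" = true) :
    ∀ (fuel m : Nat) (pos dpos : PySem.Dict String (List Int)) (out : List String),
      labels.length - m = fuel → m ≤ labels.length →
      pvInv labels window dw (m : Int) pos dpos →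
      ((PySem.List.enumerate (labels.drop m) (m : Int)).foldl (pvStepB labels window dw) (pos, dpos, out)).2.2
        = out ++ (PySem.List.pyRange (m : Int) (labels.length : Int) 1).map (pvAVal labels window dw) := by
  intro fuel
  induction fuel with
  | zero =>
    intro m pos dpos out hfuel hmle _
    have hm : m = labels.length := by omega
    subst hm
    rw [List.drop_length, PySem.List.enumerate_nil, List.foldl_nil,
      PySem.List.pyRange_one_eq_nil le_rfl]
    simp
  | succ n ih =>
    intro m pos dpos out hfuel hmle hinv
    have hmlt : m < labels.length := by omega
    have hpre2 : 1 ≤ window ∨ pvWinD labels dw ((m : Int) + 1) ≠ [] := by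
      rcases hpre with h | h
      · exact Or.inl h
      · exact Or.inr (pv_pre_short labels dw m hmlt (h m (List.mem_range.mpr hmlt)))
    obtain ⟨hinv', hout⟩ := pv_step_facts labels window dw hw m hmlt hpre2 pos dpos out hinv
    rw [List.drop_eq_getElem_cons hmlt, PySem.List.enumerate_cons, List.foldl_cons]
    have hcast : (m : Int) + 1 = ((m + 1 : Nat) : Int) := by push_cast; ring
    rw [hcast]
    have hrec : ((PySem.List.enumerate (labels.drop (m + 1)) ((m + 1 : Nat) : Int)).foldl
          (pvStepB labels window dw)
          (pvStepB labels window dw (pos, dpos, out) ((m : Int), labels[m]))).2.2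
        = (pvStepB labels window dw (pos, dpos, out) ((m : Int), labels[m])).2.2
          ++ (PySem.List.pyRange ((m + 1 : Nat) : Int) (labels.length : Int) 1).map (pvAVal labels window dw) :=
      ih (m + 1) _ _ _ (by omega) (by omega) (hcast ▸ hinv')
    rw [hrec, hout]
    rw [PySem.List.pyRange_one_cons (show (m : Int) < (labels.length : Int) from hlen_aux labels m hmlt)]
    rw [← hcast]
    simp

-- ===== VERDICT (by name: the statement is the Claim_ definition above) =====
theorem smooth_regime_labels_asymmetric_py_spec : Claim_equal_smooth_regime_labels_asymmetric_py := by
  intro labels window dw _hdom hpre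
  obtain ⟨hw, hdisj⟩ := hpre
  unfold Spec_smooth_regime_labels_asymmetric_py
  rw [pv_A_as_map]
  unfold smooth_regime_labels_asymmetric_py_alt
  have hinv0 : pvInv labels window dw ((0 : Nat) : Int) PySem.Dict.empty PySem.Dict.empty := by
    have hwin0 : ∀ w : Int, pvWin w ((0 : Nat) : Int) = [] := fun w =>
      PySem.List.pyRange_one_eq_nil (by simp)
    refine ⟨PySem.Dict.nodup_keys_empty, PySem.Dict.nodup_keys_empty, ?_, ?_⟩
    · intro k
      rw [PySem.Dict.get?_empty, hwin0 window]
      rfl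
    · intro k
      rw [PySem.Dict.get?_empty]
      unfold pvWinD
      rw [hwin0 dw, List.filter_nil]
      rfl
  have := pv_B_loop labels window dw hw hdisj labels.length 0 PySem.Dict.empty PySem.Dict.empty []
    (by omega) (by omega) hinv0
  rw [List.drop_zero] at this
  rw [show ((0 : Nat) : Int) = (0 : Int) from rfl] at this
  rw [this]
  simp
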